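-- pv_equiv track=rewrite | github.com/c-hydro/fp-hmc | hmc/driver/dataset/drv_dataset_hmc_base_source.py | swap_dict_keys
-- ===== SOURCE A (Python) =====
-- def swap_dict_keys(dict_order_x_y):
--     dict_order_y_x = {}
--     for dset_key, dset_ws in dict_order_x_y.items():
--         for dset_type, dset_vars in dset_ws.items():
--             if dset_type not in list(dict_order_y_x.keys()):
--                 dict_order_y_x[dset_type] = {}
--             if dset_key not in list(dict_order_y_x[dset_type].keys()):
--                 dict_order_y_x[dset_type][dset_key] = {}
--             dict_order_y_x[dset_type][dset_key] = dset_vars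
--     return dict_order_y_x
-- ===== SOURCE B (Python) =====
-- def swap_dict_keys(dict_order_x_y):
--     # pre-pass: distinct inner keys (the new top-level keys) in first-encounter order
--     types = list(dict.fromkeys(t for ws in dict_order_x_y.values() for t in ws))
--     # reversed nesting: iterate types outermost, re-scan the outer dict filtering on membership
--     return {t: {k: ws[t] for k, ws in dict_order_x_y.items() if t in ws}
--             for t in types}
-- ===== Notes on version B (the rewrite author's own statement) =====
-- stated objective: simpler
-- what changed: Replaces A's single populating pass with per-entry create-if-absent dict surgery by a dedup pre-pass collecting the inner keys in first-encounter order followed by a reversed-nesting comprehension (types outermost, outer keys re-scanned with a membership filter); Pre_ excludes association lists with duplicate outer or duplicate inner keys, which do not represent a Python dict and on which overwrite-in-place vs first-match order is accidental.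
import Mathlib
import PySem

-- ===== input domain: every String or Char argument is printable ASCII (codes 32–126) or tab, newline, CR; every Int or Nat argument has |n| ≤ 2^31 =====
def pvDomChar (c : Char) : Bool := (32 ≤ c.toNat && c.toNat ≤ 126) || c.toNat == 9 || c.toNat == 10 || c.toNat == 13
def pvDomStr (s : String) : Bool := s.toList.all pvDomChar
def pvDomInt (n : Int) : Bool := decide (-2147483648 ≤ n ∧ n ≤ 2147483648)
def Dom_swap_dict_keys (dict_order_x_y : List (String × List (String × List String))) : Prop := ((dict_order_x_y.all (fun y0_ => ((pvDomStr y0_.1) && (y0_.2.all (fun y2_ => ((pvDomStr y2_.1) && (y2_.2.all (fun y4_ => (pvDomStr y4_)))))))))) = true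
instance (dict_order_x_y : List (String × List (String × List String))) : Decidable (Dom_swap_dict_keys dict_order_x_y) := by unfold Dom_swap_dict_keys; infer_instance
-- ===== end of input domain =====

-- B replaces A's single populating pass by a dedup pre-pass over the inner keys plus a
-- reversed-nesting rebuild (types outermost); return-value equivalence on dict-shaped inputs.

-- ===== PORT A =====
-- assoc-list lookup, first match: Python's d[k] on a dict given as its item list
def getk {α : Type} : List (String × α) → String → Option α
  | [], _ => none
  | (k', v) :: rest, k => if k' = k then some v else getk rest k

-- assoc-list assignment d[k] = v: overwrite in place, append if absent (Python dict assignment)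
def setk {α : Type} : List (String × α) → String → α → List (String × α)
  | [], k, v => [(k, v)]
  | (k', v') :: rest, k, v => if k' = k then (k, v) :: rest else (k', v') :: setk rest k v

-- body of A's inner loop for one (dset_type, dset_vars) pair
def stepI (dset_key : String) (acc : List (String × List (String × List String)))
    (tv : String × List String) : List (String × List (String × List String)) :=
  -- if dset_type not in list(dict_order_y_x.keys()): dict_order_y_x[dset_type] = {}
  let acc1 := if tv.1 ∈ acc.map Prod.fst then acc else setk acc tv.1 []
  let inner := (getk acc1 tv.1).getD []
  -- if dset_key not in list(dict_order_y_x[dset_type].keys()): dict_order_y_x[dset_type][dset_key] = {}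
  -- (the transient Python {} is modelled as [], it is overwritten by the next assignment)
  let inner1 := if dset_key ∈ inner.map Prod.fst then inner else setk inner dset_key []
  -- dict_order_y_x[dset_type][dset_key] = dset_vars
  setk acc1 tv.1 (setk inner1 dset_key tv.2)

def swap_dict_keys (dict_order_x_y : List (String × List (String × List String))) :
    List (String × List (String × List String)) :=
  dict_order_x_y.foldl (fun acc kw => kw.2.foldl (stepI kw.1) acc) []

-- ===== PORT B =====
def swap_dict_keys_alt (dict_order_x_y : List (String × List (String × List String))) :
    List (String × List (String × List String)) :=
  -- types = list(dict.fromkeys(t for ws in dict_order_x_y.values() for t in ws))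
  let types := PySem.List.dedup (dict_order_x_y.flatMap (fun kw => kw.2.map Prod.fst))
  -- {t: {k: ws[t] for k, ws in dict_order_x_y.items() if t in ws} for t in types}
  types.map (fun t => (t, dict_order_x_y.filterMap
    (fun kw => (getk kw.2 t).map (fun v => (kw.1, v)))))

-- ===== PRECONDITION & SPEC =====
-- Pre_ excludes association lists with duplicate outer keys or duplicate inner keys: those do
-- not represent a Python dict (dict keys are unique), so A's overwrite-in-place order and B's
-- first-match lookup are both accidental there.
def Pre_swap_dict_keys (dict_order_x_y : List (String × List (String × List String))) : Prop :=
  (dict_order_x_y.map Prod.fst).Nodup ∧ ∀ p ∈ dict_order_x_y, (p.2.map Prod.fst).Nodup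
instance (dict_order_x_y : List (String × List (String × List String))) : Decidable (Pre_swap_dict_keys dict_order_x_y) := by unfold Pre_swap_dict_keys; infer_instance

def pvWitness_swap_dict_keys : (List (String × List (String × List String))) :=
  [("x", [("t1", ["a"]), ("t2", [])]), ("y", [("t1", ["b"])])]

def Spec_swap_dict_keys (dict_order_x_y : List (String × List (String × List String))) (out : List (String × List (String × List String))) : Prop := out = swap_dict_keys_alt dict_order_x_y
instance (dict_order_x_y : List (String × List (String × List String))) (out : List (String × List (String × List String))) : Decidable (Spec_swap_dict_keys dict_order_x_y out) := by unfold Spec_swap_dict_keys; infer_instance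

-- ===== CLAIM (what is proved, stated in full; the proofs are below) =====
def Claim_equal_swap_dict_keys : Prop := ∀ (dict_order_x_y : List (String × List (String × List String))), Dom_swap_dict_keys dict_order_x_y → Pre_swap_dict_keys dict_order_x_y → Spec_swap_dict_keys dict_order_x_y (swap_dict_keys dict_order_x_y)

-- ===== LEMMAS AND PROOFS =====

-- the flattened list of inner keys, and B's inner dict for one type
def flatTy (d : List (String × List (String × List String))) : List String :=
  d.flatMap (fun kw => kw.2.map Prod.fst)

def binT (d : List (String × List (String × List String))) (t : String) :
    List (String × List String) :=
  d.filterMap (fun kw => (getk kw.2 t).map (fun v => (kw.1, v)))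

def diagMap (ts : List String) (g : String → List (String × List String)) :
    List (String × List (String × List String)) :=
  ts.map (fun x => (x, g x))

def tsOf (d : List (String × List (String × List String)))
    (u : List (String × List String)) : List String :=
  PySem.Set.update (PySem.List.dedup (flatTy d)) (u.map Prod.fst)

def gOf (d : List (String × List (String × List String))) (k : String)
    (u : List (String × List String)) : String → List (String × List String) :=
  fun t => binT d t ++ (getk u t).elim [] (fun v => [(k, v)])

-- A's accumulator after the finished prefix d and the inner-loop prefix u of the entry (k, _)
def accOf (d : List (String × List (String × List String))) (k : String)
    (u : List (String × List String)) : List (String × List (String × List String)) :=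
  diagMap (tsOf d u) (gOf d k u)

theorem getk_eq_none_iff {α : Type} (d : List (String × α)) (k : String) :
    getk d k = none ↔ k ∉ d.map Prod.fst := by
  induction d with
  | nil => simp [getk]
  | cons p rest ih =>
    obtain ⟨k', v⟩ := p
    by_cases h : k' = k <;> simp [getk, h, ih, Ne.symm]

theorem getk_append_left {α : Type} {d : List (String × α)} {k : String} {v : α}
    (h : getk d k = some v) (e : List (String × α)) : getk (d ++ e) k = some v := by
  induction d with
  | nil => simp [getk] at h
  | cons p rest ih =>
    obtain ⟨k', w⟩ := p
    by_cases hk : k' = k <;> simp_all [getk]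

theorem getk_append_right {α : Type} {d : List (String × α)} {k : String}
    (h : k ∉ d.map Prod.fst) (e : List (String × α)) : getk (d ++ e) k = getk e k := by
  induction d with
  | nil => simp
  | cons p rest ih => simp_all [getk, Ne.symm]

theorem setk_eq_append {α : Type} {d : List (String × α)} {k : String}
    (h : k ∉ d.map Prod.fst) (v : α) : setk d k v = d ++ [(k, v)] := by
  induction d with
  | nil => simp [setk]
  | cons p rest ih => simp_all [setk, Ne.symm]

theorem setk_setk_self {α : Type} (d : List (String × α)) (k : String) (v w : α) :
    setk (setk d k v) k w = setk d k w := by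
  induction d with
  | nil => simp [setk]
  | cons p rest ih =>
    obtain ⟨k', v'⟩ := p
    by_cases h : k' = k <;> simp [setk, h, ih]

theorem setk_append_right {α : Type} {A : List (String × α)} {k : String}
    (h : k ∉ A.map Prod.fst) (B : List (String × α)) (v : α) :
    setk (A ++ B) k v = A ++ setk B k v := by
  induction A with
  | nil => simp
  | cons p rest ih => simp_all [setk, Ne.symm]

theorem fst_diagMap (ts : List String) (g : String → List (String × List String)) :
    (diagMap ts g).map Prod.fst = ts := by
  induction ts with
  | nil => rfl
  | cons x rest ih => simpa [diagMap] using ih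

theorem getk_diagMap (ts : List String) (g : String → List (String × List String))
    (t : String) : getk (diagMap ts g) t = if t ∈ ts then some (g t) else none := by
  induction ts with
  | nil => simp [diagMap, getk]
  | cons x rest ih =>
    by_cases h : x = t <;> simp [diagMap, getk, h, ih, Ne.symm] <;> simp [diagMap] at ih <;>
      exact ih

theorem diagMap_congr {ts : List String} {g g' : String → List (String × List String)}
    (h : ∀ x ∈ ts, g x = g' x) : diagMap ts g = diagMap ts g' :=
  List.map_congr_left (fun x hx => by rw [h x hx])

theorem diagMap_append (ts ts' : List String) (g : String → List (String × List String)) :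
    diagMap (ts ++ ts') g = diagMap ts g ++ diagMap ts' g := by
  simp [diagMap]

theorem setk_diagMap {ts : List String} (hnd : ts.Nodup) {t : String} (ht : t ∈ ts)
    (g : String → List (String × List String)) (w : List (String × List String)) :
    setk (diagMap ts g) t w = diagMap ts (fun x => if x = t then w else g x) := by
  induction ts with
  | nil => simp at ht
  | cons x rest ih =>
    rcases List.nodup_cons.mp hnd with ⟨hx, hrest⟩
    by_cases hxt : x = t
    · subst hxt
      have hre : diagMap rest (fun x1 => if x1 = x then w else g x1) = diagMap rest g :=
        diagMap_congr (fun y hy => by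
          have hne : y ≠ x := fun he => hx (he ▸ hy)
          simp [hne])
      calc setk (diagMap (x :: rest) g) x w
          = (x, w) :: diagMap rest g := by simp [diagMap, setk]
        _ = (x, w) :: diagMap rest (fun x1 => if x1 = x then w else g x1) := by rw [hre]
        _ = diagMap (x :: rest) (fun x1 => if x1 = x then w else g x1) := by simp [diagMap]
    · rcases List.mem_cons.mp ht with h1 | h2
      · exact absurd h1.symm hxt
      · simp only [diagMap, List.map_cons, setk, if_neg hxt, List.cons.injEq]
        refine ⟨by simp [Ne.symm hxt], ?_⟩
        simpa [diagMap] using ih hrest h2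

theorem mem_map_fst_binT {d : List (String × List (String × List String))} {t x : String}
    (h : x ∈ (binT d t).map Prod.fst) : x ∈ d.map Prod.fst := by
  simp only [binT, List.map_filterMap, List.mem_filterMap] at h
  obtain ⟨kw, hkw, hx⟩ := h
  cases hg : getk kw.2 t <;> simp [hg] at hx
  exact hx ▸ List.mem_map_of_mem hkw

theorem binT_eq_nil_of_not_mem {d : List (String × List (String × List String))} {t : String}
    (h : t ∉ flatTy d) : binT d t = [] := by
  simp only [flatTy, List.mem_flatMap, not_exists, not_and] at h
  simp only [binT, List.filterMap_eq_nil_iff]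
  intro kw hkw
  have : getk kw.2 t = none := (getk_eq_none_iff _ _).mpr (h kw hkw)
  simp [this]

theorem nodup_tsOf (d : List (String × List (String × List String)))
    (u : List (String × List String)) : (tsOf d u).Nodup := by
  apply PySem.Set.nodup_update
  simp only [PySem.List.dedup_eq_ofList]
  exact PySem.Set.nodup_ofList _

theorem mem_tsOf {d : List (String × List (String × List String))}
    {u : List (String × List String)} {t : String} :
    t ∈ tsOf d u ↔ t ∈ flatTy d ∨ t ∈ u.map Prod.fst := by
  unfold tsOf
  rw [PySem.Set.mem_update]
  simp [PySem.List.dedup_eq_ofList, PySem.Set.mem_ofList]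

-- what A's inner-loop body does to an accumulator of the invariant shape
theorem stepI_diagMap {ts : List String} (hnd : ts.Nodup)
    (g : String → List (String × List String)) (k t : String) (v : List String)
    (hkt : t ∈ ts → k ∉ (g t).map Prod.fst) :
    stepI k (diagMap ts g) (t, v) =
      if t ∈ ts then diagMap ts (fun x => if x = t then setk (g t) k v else g x)
      else diagMap ts g ++ [(t, [(k, v)])] := by
  by_cases hmem : t ∈ ts
  · have hk := hkt hmem
    simp only [stepI, fst_diagMap, if_pos hmem, if_pos rfl, getk_diagMap,
      Option.getD_some, if_neg hk, if_pos hmem]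
    rw [setk_setk_self, setk_diagMap hnd hmem]
  · have hfst : t ∉ (diagMap ts g).map Prod.fst := by rw [fst_diagMap]; exact hmem
    have hget : getk (diagMap ts g) t = none := by rw [getk_diagMap]; simp [hmem]
    simp only [stepI, fst_diagMap, if_neg hmem]
    rw [setk_eq_append hfst, getk_append_right ((getk_eq_none_iff _ _).mp hget)]
    have h1 : getk [((t : String), ([] : List (String × List String)))] t = some [] := by
      simp [getk]
    rw [h1]
    simp only [Option.getD_some, List.map_nil]
    rw [if_neg (List.not_mem_nil (a := k))]
    rw [setk_setk_self, setk_append_right hfst]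
    simp [setk]

theorem step_accOf {d : List (String × List (String × List String))} {k : String}
    {u : List (String × List String)} {t : String} (v : List String)
    (hk : k ∉ d.map Prod.fst) (ht : t ∉ u.map Prod.fst) :
    stepI k (accOf d k u) (t, v) = accOf d k (u ++ [(t, v)]) := by
  have hnd : (tsOf d u).Nodup := nodup_tsOf d u
  have hutnone : getk u t = none := (getk_eq_none_iff _ _).mpr ht
  have hgt : gOf d k u t = binT d t := by simp [gOf, hutnone]
  have hkt : t ∈ tsOf d u → k ∉ (gOf d k u t).map Prod.fst := by
    intro _ hmem
    rw [hgt] at hmem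
    exact hk (mem_map_fst_binT hmem)
  have hts' : tsOf d (u ++ [(t, v)]) = PySem.Set.add (tsOf d u) t := by
    unfold tsOf
    rw [List.map_append, PySem.Set.update_append]
    simp [PySem.Set.update_cons, PySem.Set.update_nil]
  have hgsame : ∀ x, x ≠ t → gOf d k (u ++ [(t, v)]) x = gOf d k u x := by
    intro x hx
    have : getk (u ++ [(t, v)]) x = getk u x := by
      cases hux : getk u x with
      | some w => exact getk_append_left hux _
      | none =>
        rw [getk_append_right ((getk_eq_none_iff _ _).mp hux)]
        simp [getk, Ne.symm hx, hux]
    simp [gOf, this]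
  have hgnew : gOf d k (u ++ [(t, v)]) t = binT d t ++ [(k, v)] := by
    have : getk (u ++ [(t, v)]) t = some v := by
      rw [getk_append_right ht]; simp [getk]
    simp [gOf, this]
  unfold accOf
  rw [stepI_diagMap hnd (gOf d k u) k t v hkt]
  by_cases hmem : t ∈ tsOf d u
  · rw [if_pos hmem, hts', PySem.Set.add_of_mem hmem]
    apply diagMap_congr
    intro x hx
    by_cases hxt : x = t
    · subst hxt
      have hkb : k ∉ (binT d x).map Prod.fst := fun h => hk (mem_map_fst_binT h)
      rw [if_pos rfl, hgt, setk_eq_append hkb, hgnew]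
    · rw [if_neg hxt, hgsame x hxt]
  · rw [if_neg hmem, hts', PySem.Set.add_of_not_mem hmem, diagMap_append]
    congr 1
    · exact diagMap_congr (fun x hx => (hgsame x (fun he => hmem (he ▸ hx))).symm)
    · have hbt : binT d t = [] :=
        binT_eq_nil_of_not_mem (fun h => hmem (mem_tsOf.mpr (Or.inl h)))
      simp [diagMap, hgnew, hbt]

theorem inner_fold {d : List (String × List (String × List String))} {k : String}
    (hk : k ∉ d.map Prod.fst) :
    ∀ (ws u : List (String × List String)),
      ((u ++ ws).map Prod.fst).Nodup →
      ws.foldl (stepI k) (accOf d k u) = accOf d k (u ++ ws) := by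
  intro ws
  induction ws with
  | nil => intro u _; simp
  | cons tv rest ih =>
    intro u hnd
    obtain ⟨t, v⟩ := tv
    have ht : t ∉ u.map Prod.fst := by
      simp only [List.map_append, List.map_cons] at hnd
      have hdisj := (List.nodup_append.mp hnd).2.2
      intro hmem
      exact hdisj _ hmem _ List.mem_cons_self rfl
    have hstep := step_accOf (d := d) (k := k) (u := u) v hk ht
    have hnd' : (((u ++ [(t, v)]) ++ rest).map Prod.fst).Nodup := by
      simpa [List.append_assoc] using hnd
    calc ((t, v) :: rest).foldl (stepI k) (accOf d k u)
        = rest.foldl (stepI k) (accOf d k (u ++ [(t, v)])) := by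
          simp [List.foldl_cons, hstep]
      _ = accOf d k ((u ++ [(t, v)]) ++ rest) := ih (u ++ [(t, v)]) hnd'
      _ = accOf d k (u ++ (t, v) :: rest) := by rw [List.append_assoc]; rfl

theorem accOf_nil (d : List (String × List (String × List String))) (k : String) :
    accOf d k [] = swap_dict_keys_alt d := by
  unfold accOf swap_dict_keys_alt tsOf gOf diagMap
  simp only [List.map_nil, PySem.Set.update_nil]
  simp [getk, flatTy, binT]

theorem accOf_full (d : List (String × List (String × List String))) (k : String)
    (ws : List (String × List String)) :
    accOf d k ws = swap_dict_keys_alt (d ++ [(k, ws)]) := by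
  unfold accOf swap_dict_keys_alt tsOf gOf diagMap
  have h1 : PySem.List.dedup ((d ++ [(k, ws)]).flatMap (fun kw => kw.2.map Prod.fst))
      = PySem.Set.update (PySem.List.dedup (flatTy d)) (ws.map Prod.fst) := by
    simp only [PySem.List.dedup_eq_ofList, List.flatMap_append, flatTy]
    rw [PySem.Set.ofList_append]
    simp
  rw [h1]
  apply List.map_congr_left
  intro t _
  simp only [List.filterMap_append, binT, Prod.mk.injEq, true_and]
  congr 1
  cases h : getk ws t <;> simp [h]

theorem swap_eq_alt (d : List (String × List (String × List String)))
    (hpre : Pre_swap_dict_keys d) : swap_dict_keys d = swap_dict_keys_alt d := by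
  induction d using List.reverseRecOn with
  | nil => rfl
  | append_singleton d e ih =>
    obtain ⟨k, ws⟩ := e
    obtain ⟨hout, hin⟩ := hpre
    simp only [List.map_append, List.map_cons, List.map_nil] at hout
    have hk : k ∉ d.map Prod.fst := by
      have hdisj := (List.nodup_append.mp hout).2.2
      intro hmem
      exact hdisj _ hmem _ List.mem_cons_self rfl
    have hpre' : Pre_swap_dict_keys d :=
      ⟨(List.nodup_append.mp hout).1, fun p hp => hin p (List.mem_append_left _ hp)⟩
    have hws : (([] ++ ws).map Prod.fst).Nodup := by
      simpa using hin (k, ws) (List.mem_append_right _ List.mem_cons_self)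
    calc swap_dict_keys (d ++ [(k, ws)])
        = ws.foldl (stepI k) (swap_dict_keys d) := by
          unfold swap_dict_keys; rw [List.foldl_append]; rfl
      _ = ws.foldl (stepI k) (accOf d k []) := by rw [ih hpre', ← accOf_nil d k]
      _ = accOf d k ([] ++ ws) := inner_fold hk ws [] hws
      _ = swap_dict_keys_alt (d ++ [(k, ws)]) := by rw [List.nil_append]; exact accOf_full d k ws

-- ===== VERDICT (by name: the statement is the Claim_ definition above) =====
theorem swap_dict_keys_spec : Claim_equal_swap_dict_keys := by
  intro d _ hpre
  unfold Spec_swap_dict_keys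
  exact swap_eq_alt d hpre
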